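-- pv_equiv track=rewrite | github.com/HBinhCT/Q-project | hackerrank/Algorithms/Maximum Subarray Sum/solution.py | maximumSum
-- ===== SOURCE A (Python) =====
-- def maximumSum(a, m):
--     import bisect
--     max_sum, prefix = 0, 0
--     calculate_prefix = []
--     for i in a:
--         prefix = (prefix + i) % m
--         max_sum = max(max_sum, prefix)
--         cur_prefix = bisect.bisect_left(calculate_prefix, prefix + 1)
--         if cur_prefix < len(calculate_prefix):
--             max_sum = max(max_sum, prefix - calculate_prefix[cur_prefix] + m)
--         calculate_prefix.insert(cur_prefix, prefix)
--     return max_sum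
-- ===== SOURCE B (Python) =====
-- def maximumSum(a, m):
--     # Exhaustive pairwise scan over prefix sums (mod m) with the direct
--     # (q - r) % m formula, instead of A's sorted-list + bisect successor trick.
--     p = 0
--     pre = [0]
--     for x in a:
--         p = (p + x) % m
--         pre.append(p)
--     best = 0
--     seen = []
--     for q in pre:
--         for r in seen:
--             c = (q - r) % m
--             if c > best:
--                 best = c
--         seen.append(q)
--     return best
-- ===== Notes on version B (the rewrite author's own statement) =====
-- stated objective: alternative
-- what changed: B replaces A's incrementally maintained sorted prefix list with bisect successor queries by a direct exhaustive scan over all ordered prefix-sum pairs using the (q - r) % m formula.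
import Mathlib
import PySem

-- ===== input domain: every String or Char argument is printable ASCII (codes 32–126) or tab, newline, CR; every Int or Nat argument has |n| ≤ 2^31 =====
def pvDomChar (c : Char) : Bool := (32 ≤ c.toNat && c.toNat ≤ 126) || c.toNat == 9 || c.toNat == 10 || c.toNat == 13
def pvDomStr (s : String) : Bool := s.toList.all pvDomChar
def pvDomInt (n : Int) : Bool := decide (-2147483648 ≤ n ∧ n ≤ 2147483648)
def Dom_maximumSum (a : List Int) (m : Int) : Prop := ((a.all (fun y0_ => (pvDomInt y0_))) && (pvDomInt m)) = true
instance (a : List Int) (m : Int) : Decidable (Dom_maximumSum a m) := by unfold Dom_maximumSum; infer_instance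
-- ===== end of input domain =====

-- B replaces A's sorted-list + bisect successor search by a direct exhaustive scan over
-- all ordered prefix-sum pairs (same asymptotic cost; objective: alternative algorithm).

-- ===== PORT A =====
-- one iteration of A's loop; state = (max_sum, prefix, calculate_prefix)
def aStep (m : Int) (st : Int × Int × List Int) (i : Int) : Int × Int × List Int :=
  let prefix' := PySem.Int.mod (st.2.1 + i) m
  let maxSum₁ := max st.1 prefix'
  let curPrefix := PySem.List.bisectLeft st.2.2 (prefix' + 1)
  let maxSum₂ :=
    if curPrefix < st.2.2.length then
      max maxSum₁ (prefix' - st.2.2.getD curPrefix 0 + m)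
    else maxSum₁
  (maxSum₂, prefix', PySem.List.insert st.2.2 (curPrefix : Int) prefix')

def maximumSum (a : List Int) (m : Int) : Int :=
  (a.foldl (aStep m) (0, 0, [])).1

-- ===== PORT B =====
-- B's inner loop: for r in seen: c = (q - r) % m; if c > best: best = c
def altInner (m q best : Int) (seen : List Int) : Int :=
  seen.foldl (fun b r => let c := PySem.Int.mod (q - r) m; if c > b then c else b) best

-- B's first loop step: p = (p + x) % m; pre.append(p); state = (p, pre)
def bPre (m : Int) (st : Int × List Int) (x : Int) : Int × List Int :=
  let p := PySem.Int.mod (st.1 + x) m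
  (p, st.2 ++ [p])

-- B's outer loop step: inner loop over seen, then seen.append(q); state = (best, seen)
def bOuter (m : Int) (st : Int × List Int) (q : Int) : Int × List Int :=
  (altInner m q st.1 st.2, st.2 ++ [q])

def maximumSum_alt (a : List Int) (m : Int) : Int :=
  let pre := (a.foldl (bPre m) (0, [0])).2
  (pre.foldl (bOuter m) (0, [])).1

-- ===== PRECONDITION & SPEC =====
-- Pre_ excludes exactly the inputs where Python A raises ZeroDivisionError: m = 0 with a nonempty.
def Pre_maximumSum (a : List Int) (m : Int) : Prop := m ≠ 0 ∨ a = []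
instance (a : List Int) (m : Int) : Decidable (Pre_maximumSum a m) := by
  unfold Pre_maximumSum; infer_instance

def pvWitness_maximumSum : List Int × Int := ([3, -1, 4, 1, -5], 7)

def Spec_maximumSum (a : List Int) (m : Int) (out : Int) : Prop := out = maximumSum_alt a m
instance (a : List Int) (m : Int) (out : Int) : Decidable (Spec_maximumSum a m out) := by unfold Spec_maximumSum; infer_instance

-- ===== CLAIM (what is proved, stated in full; the proofs are below) =====
def Claim_equal_maximumSum : Prop := ∀ (a : List Int) (m : Int), Dom_maximumSum a m → Pre_maximumSum a m → Spec_maximumSum a m (maximumSum a m)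

-- ===== LEMMAS AND PROOFS =====

-- range of a Python-mod residue, covering both signs of the modulus
def Rng (m r : Int) : Prop := (0 < m → 0 ≤ r ∧ r < m) ∧ (m < 0 → m < r ∧ r ≤ 0)

-- the list of running prefixes (p + x) % m produced along a
def prefixes (m : Int) (p : Int) : List Int → List Int
  | [] => []
  | x :: xs => PySem.Int.mod (p + x) m :: prefixes m (PySem.Int.mod (p + x) m) xs

theorem rng_mod (m x : Int) : Rng m (PySem.Int.mod x m) := by
  constructor
  · intro h; exact ⟨PySem.Int.mod_nonneg x h, PySem.Int.mod_lt x h⟩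
  · intro h; exact PySem.Int.mod_neg_bounds x h

theorem rng_zero (m : Int) : Rng m 0 := by constructor <;> intro h <;> omega

theorem mod_unique (m x v : Int) (hm : m ≠ 0) (hb : Rng m v) (hd : m ∣ x - v) :
    PySem.Int.mod x m = v := by
  have h1 := PySem.Int.floordiv_mul_add_mod x m
  have hd2 : m ∣ PySem.Int.mod x m - v := by
    have hxm : m ∣ x - PySem.Int.mod x m := ⟨PySem.Int.floordiv x m, by linarith⟩
    have hsub := dvd_sub hd hxm
    have heq : x - v - (x - PySem.Int.mod x m) = PySem.Int.mod x m - v := by ring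
    rwa [heq] at hsub
  have hr := rng_mod m x
  rcases lt_or_gt_of_ne hm with hneg | hpos
  · have h2 := hr.2 hneg
    have h3 := hb.2 hneg
    have : (-m) ∣ PySem.Int.mod x m - v := (Int.neg_dvd).mpr hd2
    have := Int.eq_zero_of_abs_lt_dvd this (by rw [abs_lt]; omega)
    omega
  · have h2 := hr.1 hpos
    have h3 := hb.1 hpos
    have := Int.eq_zero_of_abs_lt_dvd hd2 (by rw [abs_lt]; omega)
    omega

theorem mod_self (m r : Int) (hm : m ≠ 0) (h : Rng m r) : PySem.Int.mod r m = r :=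
  mod_unique m r r hm h (by simp)

-- B's inner fold is a fold of max
def mf (m q : Int) (b r : Int) : Int := max b (PySem.Int.mod (q - r) m)

theorem altInner_eq_foldmax (m q : Int) (l : List Int) : ∀ b, altInner m q b l = l.foldl (mf m q) b := by
  induction l with
  | nil => intro b; rfl
  | cons r t ih =>
    intro b
    have hstep : (if PySem.Int.mod (q - r) m > b then PySem.Int.mod (q - r) m else b) = mf m q b r := by
      unfold mf; split_ifs <;> omega
    simp only [altInner, List.foldl_cons] at *
    rw [hstep, ih]

theorem foldmax_perm (m q : Int) {l₁ l₂ : List Int} (h : l₁.Perm l₂) :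
    ∀ b, l₁.foldl (mf m q) b = l₂.foldl (mf m q) b := by
  induction h with
  | nil => intro b; rfl
  | cons x _ ih => intro b; simp only [List.foldl_cons]; exact ih _
  | swap x y l =>
    intro b
    simp only [List.foldl_cons]
    have : mf m q (mf m q b y) x = mf m q (mf m q b x) y := by unfold mf; omega
    rw [this]
  | trans _ _ ih₁ ih₂ => intro b; rw [ih₁, ih₂]

theorem foldmax_le (m q : Int) (l : List Int) :
    ∀ b, (∀ r ∈ l, PySem.Int.mod (q - r) m ≤ b) → l.foldl (mf m q) b = b := by
  induction l with
  | nil => intro b _; rfl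
  | cons r t ih =>
    intro b h
    have h1 : mf m q b r = b := by
      have := h r (by simp)
      unfold mf; omega
    simp only [List.foldl_cons, h1]
    exact ih b fun s hs => h s (by simp [hs])

theorem mem_take_getElem {l : List Int} {t : Nat} {r : Int} (h : r ∈ l.take t) :
    ∃ j, ∃ hj : j < l.length, j < t ∧ l[j] = r := by
  rcases List.mem_iff_getElem.mp h with ⟨j, hj, hr⟩
  have hjl : j < l.length := by
    have := hj; simp [List.length_take] at this; omega
  refine ⟨j, hjl, ?_, ?_⟩
  · have := hj; simp [List.length_take] at this; omega
  · rw [← hr]; exact (List.getElem_take).symm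

theorem mem_drop_getElem {l : List Int} {t : Nat} {r : Int} (h : r ∈ l.drop t) :
    ∃ j, ∃ hj : j < l.length, t ≤ j ∧ l[j] = r := by
  rcases List.mem_iff_getElem.mp h with ⟨j, hj, hr⟩
  have hjl : t + j < l.length := by
    have := hj; simp [List.length_drop] at this; omega
  refine ⟨t + j, hjl, by omega, ?_⟩
  rw [← hr]; exact (List.getElem_drop).symm

-- the per-iteration equality: A's bisect-based update equals B's scan over seen
theorem step_eq (m : Int) (hm : m ≠ 0) (ms pf' : Int) (cp seen : List Int)
    (hs : cp.Pairwise (· ≤ ·)) (hperm : seen.Perm (0 :: cp))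
    (hr : ∀ r ∈ cp, Rng m r) (hp : Rng m pf') (hms : 0 ≤ ms) :
    altInner m pf' ms seen =
      (if PySem.List.bisectLeft cp (pf' + 1) < cp.length then
        max (max ms pf') (pf' - cp.getD (PySem.List.bisectLeft cp (pf' + 1)) 0 + m)
      else max ms pf') := by
  obtain ⟨hlen, hlt, hge⟩ := PySem.List.bisectLeft_spec cp (pf' + 1) hs
  set t := PySem.List.bisectLeft cp (pf' + 1) with ht
  rw [altInner_eq_foldmax, foldmax_perm m pf' hperm]
  have hmod0 : PySem.Int.mod (pf' - 0) m = pf' := by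
    rw [sub_zero]; exact mod_self m pf' hm hp
  have hhead : List.foldl (mf m pf') ms (0 :: cp) = List.foldl (mf m pf') (max ms pf') cp := by
    simp only [List.foldl_cons, mf, hmod0]
  rw [hhead]
  rcases lt_or_gt_of_ne hm with hneg | hpos
  · -- m < 0 : every candidate is ≤ 0 ≤ ms, both sides are ms
    have hpf := hp.2 hneg
    have hms' : max ms pf' = ms := by omega
    rw [hms', foldmax_le m pf' cp ms (fun r _ => by have := (rng_mod m (pf' - r)).2 hneg; omega)]
    split_ifs with hcase
    · have h1 : cp.getD t 0 = cp[t]'hcase := List.getD_eq_getElem cp 0 hcase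
      have h2 := hge t hcase le_rfl
      rw [h1]; omega
    · omega
  · -- 0 < m
    have hpf := hp.1 hpos
    have htake : List.foldl (mf m pf') (max ms pf') (cp.take t) = max ms pf' := by
      apply foldmax_le
      intro r hrmem
      obtain ⟨j, hj, hjt, hjr⟩ := mem_take_getElem hrmem
      have h1 := hlt j hj hjt
      have h2 := (hr _ (List.getElem_mem hj)).1 hpos
      have : PySem.Int.mod (pf' - r) m = pf' - r := by
        apply mod_self m _ hm
        constructor <;> intro h <;> omega
      omega
    have hsplit : List.foldl (mf m pf') (max ms pf') cp
        = List.foldl (mf m pf') (max ms pf') (cp.drop t) := by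
      conv_lhs => rw [← List.take_append_drop t cp]
      rw [List.foldl_append, htake]
    rw [hsplit]
    rcases hdrop : cp.drop t with _ | ⟨g0, rest⟩
    · have : cp.length ≤ t := by
        have := List.drop_eq_nil_iff.mp hdrop; omega
      rw [if_neg (by omega)]; rfl
    · have htlen : t < cp.length := by
        by_contra hc
        rw [List.drop_eq_nil_of_le (by omega)] at hdrop; simp at hdrop
      have hget? : cp[t]? = some g0 := by
        rw [← List.head?_drop, hdrop]; rfl
      have hg0 : cp[t]'htlen = g0 := by
        rw [List.getElem?_eq_getElem htlen] at hget?
        exact Option.some.inj hget?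
      have hg0mem : g0 ∈ cp := by rw [← hg0]; exact List.getElem_mem htlen
      have hg0rng := (hr g0 hg0mem).1 hpos
      have hg0gt : pf' + 1 ≤ g0 := by rw [← hg0]; exact hge t htlen le_rfl
      have hmodg0 : PySem.Int.mod (pf' - g0) m = pf' - g0 + m := by
        apply mod_unique m _ _ hm
        · constructor <;> intro h <;> omega
        · exact ⟨-1, by ring⟩
      have hrestge : ∀ r ∈ rest, g0 ≤ r := by
        intro r hrmem
        have hpw : (cp.drop t).Pairwise (· ≤ ·) := List.Pairwise.sublist (List.drop_sublist t cp) hs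
        rw [hdrop] at hpw
        exact (List.pairwise_cons.mp hpw).1 r hrmem
      have hrestmem : ∀ r ∈ rest, r ∈ cp := by
        intro r hrmem
        have hmem : r ∈ cp.drop t := by rw [hdrop]; exact List.mem_cons_of_mem _ hrmem
        exact List.mem_of_mem_drop hmem
      rw [List.foldl_cons]
      have hstep1 : mf m pf' (max ms pf') g0 = max (max ms pf') (pf' - g0 + m) := by
        unfold mf; rw [hmodg0]
      rw [hstep1, foldmax_le]
      · rw [if_pos htlen, List.getD_eq_getElem cp 0 htlen, hg0]
      · intro r hrmem
        have h1 := hrestge r hrmem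
        have h2 := (hr r (hrestmem r hrmem)).1 hpos
        have : PySem.Int.mod (pf' - r) m = pf' - r + m := by
          apply mod_unique m _ _ hm
          · constructor <;> intro h <;> omega
          · exact ⟨-1, by ring⟩
        omega

-- B's first loop builds acc ++ prefixes m p a
theorem build_pre (m : Int) : ∀ (a : List Int) (p : Int) (acc : List Int),
    (a.foldl (bPre m) (p, acc)).2 = acc ++ prefixes m p a := by
  intro a
  induction a with
  | nil => intro p acc; simp [prefixes]
  | cons x xs ih =>
    intro p acc
    simp only [List.foldl_cons, bPre, prefixes, ih]
    simp

-- the main invariant: A's fold over a equals B's outer fold over the remaining prefixes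
theorem main_inv (m : Int) (hm : m ≠ 0) : ∀ (a : List Int) (ms pf : Int) (cp seen : List Int),
    cp.Pairwise (· ≤ ·) → seen.Perm (0 :: cp) → (∀ r ∈ cp, Rng m r) → Rng m pf → 0 ≤ ms →
    (a.foldl (aStep m) (ms, pf, cp)).1 = ((prefixes m pf a).foldl (bOuter m) (ms, seen)).1 := by
  intro a
  induction a with
  | nil => intro ms pf cp seen _ _ _ _ _; rfl
  | cons x xs ih =>
    intro ms pf cp seen hs hperm hr hp hms
    obtain ⟨hlen, hlt, hge⟩ := PySem.List.bisectLeft_spec cp (PySem.Int.mod (pf + x) m + 1) hs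
    simp only [List.foldl_cons, prefixes, aStep, bOuter]
    set pf' := PySem.Int.mod (pf + x) m with hpf'
    set t := PySem.List.bisectLeft cp (pf' + 1) with ht
    have hprng : Rng m pf' := rng_mod m (pf + x)
    have hins : PySem.List.insert cp (t : Int) pf' = cp.take t ++ pf' :: cp.drop t :=
      PySem.List.insert_natCast cp t pf' hlen
    have hdropge : ∀ r ∈ cp.drop t, pf' + 1 ≤ r := by
      intro r hrmem
      obtain ⟨j, hj, hjt, hjr⟩ := mem_drop_getElem hrmem
      have := hge j hj hjt; omega
    have htakele : ∀ r ∈ cp.take t, r ≤ pf' := by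
      intro r hrmem
      obtain ⟨j, hj, hjt, hjr⟩ := mem_take_getElem hrmem
      have := hlt j hj hjt; omega
    have hs' : (cp.take t ++ pf' :: cp.drop t).Pairwise (· ≤ ·) := by
      rw [List.pairwise_append]
      refine ⟨List.Pairwise.sublist (List.take_sublist t cp) hs, ?_, ?_⟩
      · rw [List.pairwise_cons]
        refine ⟨fun r hrmem => by have := hdropge r hrmem; omega,
          List.Pairwise.sublist (List.drop_sublist t cp) hs⟩
      · intro p1 h1 p2 h2
        have ha := htakele p1 h1
        rcases List.mem_cons.mp h2 with h | h
        · omega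
        · have := hdropge p2 h; omega
    have hperm' : (seen ++ [pf']).Perm (0 :: (cp.take t ++ pf' :: cp.drop t)) := by
      have h1 : (seen ++ [pf']).Perm (pf' :: seen) := List.perm_append_singleton pf' seen
      have h2 : (pf' :: seen).Perm (pf' :: 0 :: cp) := hperm.cons pf'
      have h3 : (pf' :: 0 :: cp).Perm (0 :: pf' :: cp) := List.Perm.swap 0 pf' cp
      have h4 : (pf' :: cp).Perm (cp.take t ++ pf' :: cp.drop t) := by
        have h5 := (@List.perm_middle _ pf' (cp.take t) (cp.drop t)).symm
        rw [List.take_append_drop] at h5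
        exact h5
      exact h1.trans (h2.trans (h3.trans (h4.cons 0)))
    have hr' : ∀ r ∈ cp.take t ++ pf' :: cp.drop t, Rng m r := by
      intro r hrmem
      rcases List.mem_append.mp hrmem with h | h
      · exact hr r (List.mem_of_mem_take h)
      · rcases List.mem_cons.mp h with h | h
        · rw [h]; exact hprng
        · exact hr r (List.mem_of_mem_drop h)
    have hms2 :
        (if t < cp.length then max (max ms pf') (pf' - cp.getD t 0 + m) else max ms pf')
          = altInner m pf' ms seen :=
      (step_eq m hm ms pf' cp seen hs hperm hr hprng hms).symm
    have hms2nn : 0 ≤ (if t < cp.length then max (max ms pf') (pf' - cp.getD t 0 + m) else max ms pf') := by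
      split_ifs <;> omega
    rw [hins]
    rw [show (prefixes m pf' xs).foldl (bOuter m) (altInner m pf' ms seen, seen ++ [pf'])
        = (prefixes m pf' xs).foldl (bOuter m)
            ((if t < cp.length then max (max ms pf') (pf' - cp.getD t 0 + m) else max ms pf'), seen ++ [pf'])
      from by rw [hms2]]
    exact ih _ _ _ _ hs' hperm' hr' hprng hms2nn

-- ===== VERDICT (by name: the statement is the Claim_ definition above) =====
theorem maximumSum_spec : Claim_equal_maximumSum := by
  unfold Claim_equal_maximumSum Spec_maximumSum
  intro a m _ hpre
  rcases hpre with hm | ha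
  · show maximumSum a m = maximumSum_alt a m
    unfold maximumSum maximumSum_alt
    rw [build_pre m a 0 [0]]
    have h0 : (([0] ++ prefixes m 0 a).foldl (bOuter m) (0, [])).1
        = ((prefixes m 0 a).foldl (bOuter m) (0, [0])).1 := by
      simp [List.foldl_cons, bOuter, altInner]
    rw [h0]
    exact main_inv m hm a 0 0 [] [0] (by simp) (by rfl) (by simp) (rng_zero m) le_rfl
  · subst ha; rfl
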